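-- pv_equiv track=rewrite | github.com/linhdvu14/cp-sols | sols/Google/KickStart/2022/2022_A/C_Palindrome_Free_Strings.py | solve
-- ===== SOURCE A (Python) =====
-- def solve(N, S):
--     if N < 5: return True
--     def is_palindome(s): return all(s[i] == s[-1-i] for i in range(len(s)//2))
--
--     # gen cands for S[:5]
--     cur = ['']
--     for i in range(5):
--         nxt = []
--         tail = S[i] if S[i] != '?' else '01'
--         for cand in cur:
--             for t in tail:
--                 nxt.append(cand + t)
--         cur = nxt
--     cur = [cand for cand in cur if not is_palindome(cand)]
--
--     # gen valid 5-window, check 6-window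
--     for i in range(5, N):
--         if not cur: break
--         nxt = []
--         tail = S[i] if S[i] != '?' else '01'
--         for cand in cur:
--             for t in tail:
--                 if not is_palindome(cand + t) and not is_palindome(cand[1:] + t):
--                     nxt.append(cand[1:] + t)
--         cur = nxt
--
--     return len(cur) > 0
-- ===== SOURCE B (Python) =====
-- def solve(N, S):
--     if N < 5: return True
--     def pal(s): return s == s[::-1]
--     def completions(pat):
--         res = ['']
--         for ch in pat:
--             opts = '01' if ch == '?' else ch
--             res = [p + c for p in res for c in opts]
--         return res
--     # nxt[w] == True  iff  the suffix S[i:N] can be completed starting from window w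
--     nxt = {w: True for w in completions(S[N - 5:N])}
--     for i in range(N - 1, 4, -1):
--         cur = {}
--         opts = '01' if S[i] == '?' else S[i]
--         for w in completions(S[i - 5:i]):
--             cur[w] = any(not pal(w + c) and not pal(w[1:] + c) and nxt[w[1:] + c]
--                          for c in opts)
--         nxt = cur
--     return any(not pal(w) and nxt[w] for w in completions(S[0:5]))
-- ===== Notes on version B (the rewrite author's own statement) =====
-- stated objective: alternative
-- what changed: A's forward breadth-first search over a duplicate-carrying list of surviving 5-character windows is replaced by a backward dynamic program: for each position (right to left) a dict maps each of the <=32 pattern-completions of the preceding 5-window to whether the suffix can still be completed.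
-- outside the precondition, e.g. on solve(10, '00000'): A returns False, B raises IndexError
import Mathlib
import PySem

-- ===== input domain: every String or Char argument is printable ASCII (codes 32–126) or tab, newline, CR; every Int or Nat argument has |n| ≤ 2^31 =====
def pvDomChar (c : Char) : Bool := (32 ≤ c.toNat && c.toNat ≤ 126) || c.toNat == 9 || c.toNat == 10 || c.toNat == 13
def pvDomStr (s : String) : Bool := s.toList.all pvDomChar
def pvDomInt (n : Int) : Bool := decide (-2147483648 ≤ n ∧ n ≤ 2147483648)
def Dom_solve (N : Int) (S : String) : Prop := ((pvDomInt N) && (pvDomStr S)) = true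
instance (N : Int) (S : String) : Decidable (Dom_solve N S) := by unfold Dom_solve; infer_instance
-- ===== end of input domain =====

-- B replaces A's forward breadth-first list of surviving 5-windows by a backward DP over the ≤ 32
-- pattern-completions per position (a dict window → suffix-completable); same return value.

-- ===== PORT A =====
-- is_palindome(s) = all(s[i] == s[-1-i] for i in range(len(s)//2))
def palA (s : List Char) : Bool :=
  (PySem.List.pyRange 0 (PySem.Int.floordiv (s.length : Int) 2) 1).all fun i =>
    PySem.List.pyGetD s i ' ' == PySem.List.pyGetD s (-1 - i) ' '

-- tail = S[i] if S[i] != '?' else '01'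
def tailA (s : List Char) (i : Int) : List Char :=
  if PySem.List.pyGetD s i ' ' != '?' then [PySem.List.pyGetD s i ' '] else ['0', '1']

-- the second loop of A ('for i in range(5, N)'), with its 'if not cur: break'
def loopA (s : List Char) : List Int → List (List Char) → List (List Char)
  | [], cur => cur
  | i :: rest, cur =>
    if cur.isEmpty then cur
    else
      loopA s rest <|
        cur.foldl (fun nxt cand =>
          (tailA s i).foldl (fun nxt t =>
            if !palA (cand ++ [t]) && !palA (PySem.List.slice cand (some 1) none ++ [t]) then
              nxt ++ [PySem.List.slice cand (some 1) none ++ [t]]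
            else nxt) nxt) []

def solve (N : Int) (S : String) : Bool :=
  if N < 5 then true
  else
    let s := S.toList
    let cur := (PySem.List.pyRange 0 5 1).foldl (fun cur i =>
        cur.foldl (fun nxt cand =>
          (tailA s i).foldl (fun nxt t => nxt ++ [cand ++ [t]]) nxt) []) [([] : List Char)]
    let cur := cur.filter fun cand => !palA cand
    decide (0 < (loopA s (PySem.List.pyRange 5 N 1) cur).length)

-- ===== PORT B =====
-- pal(s) = (s == s[::-1])  (s[::-1] is List.reverse: PySem.List.slice?_none_none_neg_one)
def palB (s : List Char) : Bool := s == s.reverse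

-- opts = '01' if ch == '?' else ch
def optsB (ch : Char) : List Char := if ch == '?' then ['0', '1'] else [ch]

-- completions(pat): all ways to replace each '?' by '0'/'1'
def compsB (pat : List Char) : List (List Char) :=
  pat.foldl (fun res ch => res.flatMap fun p => (optsB ch).map fun c => p ++ [c]) [([] : List Char)]

def solve_alt (N : Int) (S : String) : Bool :=
  if N < 5 then true
  else
    let s := S.toList
    let nxt : PySem.Dict (List Char) Bool :=
      (compsB (PySem.List.slice s (some (N - 5)) (some N))).foldl
        (fun d w => d.insert w true) PySem.Dict.empty
    let nxt := (PySem.List.pyRange (N - 1) 4 (-1)).foldl (fun nxt i =>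
        (compsB (PySem.List.slice s (some (i - 5)) (some i))).foldl (fun cur w =>
          cur.insert w ((optsB (PySem.List.pyGetD s i ' ')).any fun c =>
            !palB (w ++ [c]) && !palB (PySem.List.slice w (some 1) none ++ [c]) &&
            -- nxt[w[1:] + c]: the key is always present in nxt (proved below), so getD is exact
            nxt.getD (PySem.List.slice w (some 1) none ++ [c]) false)) PySem.Dict.empty) nxt
    (compsB (PySem.List.slice s none (some 5))).any fun w => !palB w && nxt.getD w false

-- ===== PRECONDITION & SPEC =====
-- Pre_ excludes N > len(S) (with N ≥ 5): there A indexes S out of range and raises IndexError,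
-- except when its candidate list happens to die out first, in which case it returns False — which
-- of the two happens depends on the search state, not on any closed-form condition on the input.
def Pre_solve (N : Int) (S : String) : Prop := N < 5 ∨ N ≤ (S.toList.length : Int)
instance (N : Int) (S : String) : Decidable (Pre_solve N S) := by unfold Pre_solve; infer_instance
def pvWitness_solve : Int × String := (6, "01?a0b")

def Spec_solve (N : Int) (S : String) (out : Bool) : Prop := out = solve_alt N S
instance (N : Int) (S : String) (out : Bool) : Decidable (Spec_solve N S out) := by unfold Spec_solve; infer_instance

-- ===== CLAIM (what is proved, stated in full; the proofs are below) =====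
def Claim_equal_solve : Prop := ∀ (N : Int) (S : String), Dom_solve N S → Pre_solve N S → Spec_solve N S (solve N S)

-- ===== LEMMAS AND PROOFS =====

-- the common spec: GspecP s P w = "starting from window w, positions P can be filled validly"
def GspecP (s : List Char) : List Int → List Char → Bool
  | [], _ => true
  | i :: P, w =>
    (tailA s i).any fun c =>
      !palB (w ++ [c]) && !palB (w.tail ++ [c]) && GspecP s P (w.tail ++ [c])

lemma Gspec_nil (s : List Char) (w : List Char) : GspecP s [] w = true := rfl

lemma Gspec_cons (s : List Char) (i : Int) (P : List Int) (w : List Char) :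
    GspecP s (i :: P) w = ((tailA s i).any fun c =>
      !palB (w ++ [c]) && !palB (w.tail ++ [c]) && GspecP s P (w.tail ++ [c])) := rfl

lemma half_palindrome_iff (s : List Char) :
    (∀ k : Nat, k < s.length / 2 → s[k]? = s[s.length - (k + 1)]?) ↔ s = s.reverse := by
  constructor
  · intro h
    apply List.ext_getElem?
    intro i
    by_cases hi : i < s.length
    · rw [List.getElem?_reverse hi]
      by_cases h1 : i < s.length / 2
      · have e0 : s.length - 1 - i = s.length - (i + 1) := by omega
        rw [e0]
        exact h i h1
      · by_cases h2 : s.length - 1 - i < s.length / 2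
        · have := h _ h2
          have e : s.length - (s.length - 1 - i + 1) = i := by omega
          rw [e] at this
          exact this.symm
        · have e : s.length - 1 - i = i := by omega
          rw [e]
    · rw [List.getElem?_eq_none (by omega), List.getElem?_eq_none (by simp; omega)]
  · intro h k hk
    conv_lhs => rw [h]
    rw [List.getElem?_reverse (by omega)]
    congr 1
    omega

lemma pyGetD_nat (s : List Char) (k : Nat) (hk : k < s.length) :
    PySem.List.pyGetD s ((k : Nat) : Int) ' ' = s[k] := by
  rw [PySem.List.pyGetD_eq_getElem s ' ' (by omega) (by exact_mod_cast hk)]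
  congr 1

lemma pyGetD_neg_nat (s : List Char) (k : Nat) (hk : k + 1 ≤ s.length) :
    PySem.List.pyGetD s (-1 - ((k : Nat) : Int)) ' ' = s[s.length - (k + 1)] := by
  have e : (-1 - ((k : Nat) : Int)) = -(((k + 1 : Nat)) : Int) := by push_cast; ring
  rw [e, PySem.List.pyGetD_neg_natCast s (k + 1) ' ' (by omega) hk]

lemma palA_eq_palB (s : List Char) : palA s = palB s := by
  have h2 : PySem.Int.floordiv ((s.length : Int)) 2 = ((s.length / 2 : Nat) : Int) := by
    exact_mod_cast PySem.Int.floordiv_natCast s.length 2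
  rw [Bool.eq_iff_iff]
  unfold palA palB
  rw [List.all_eq_true, beq_iff_eq, ← half_palindrome_iff]
  constructor
  · intro h k hk
    have hmem : ((k : Nat) : Int) ∈ PySem.List.pyRange 0 (PySem.Int.floordiv ((s.length : Int)) 2) 1 := by
      rw [h2, PySem.List.mem_pyRange_one]
      constructor <;> omega
    have := h _ hmem
    rw [beq_iff_eq, pyGetD_nat s k (by omega), pyGetD_neg_nat s k (by omega)] at this
    rw [List.getElem?_eq_getElem (by omega), List.getElem?_eq_getElem (by omega), this]
  · intro h i hi
    rw [h2, PySem.List.mem_pyRange_one] at hi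
    obtain ⟨hi0, hi1⟩ := hi
    set k := i.toNat with hk
    have hik : i = ((k : Nat) : Int) := by omega
    have hklt : k < s.length / 2 := by omega
    have := h k hklt
    rw [List.getElem?_eq_getElem (by omega), List.getElem?_eq_getElem (by omega),
      Option.some_inj] at this
    rw [beq_iff_eq, hik, pyGetD_nat s k (by omega), pyGetD_neg_nat s k (by omega), this]

lemma tailA_eq_optsB (s : List Char) (i : Int) :
    tailA s i = optsB (PySem.List.pyGetD s i ' ') := by
  unfold tailA optsB
  by_cases h : PySem.List.pyGetD s i ' ' = '?' <;> simp [h]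

-- A's loop returns a nonempty list iff some current window satisfies the spec
lemma loopA_any (s : List Char) (P : List Int) :
    ∀ cur : List (List Char), (loopA s P cur ≠ []) ↔ cur.any (GspecP s P) = true := by
  induction P with
  | nil =>
    intro cur
    unfold loopA
    cases cur <;> simp [Gspec_nil]
  | cons i rest ih =>
    intro cur
    unfold loopA
    by_cases hc : cur.isEmpty
    · rw [List.isEmpty_iff] at hc
      subst hc
      simp
    · rw [if_neg (by simp [hc]), ih]
      simp only [PySem.List.slice_from_one, PySem.List.foldl_append_if,
        PySem.List.foldl_append_eq_flatMap, List.nil_append, List.any_flatMap,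
        List.any_map, List.any_filter, Function.comp_def,
        palA_eq_palB, Bool.and_assoc]
      have hfun : (fun a => (tailA s i).any fun c =>
          !palB (a ++ [c]) && (!palB (a.tail ++ [c]) && GspecP s rest (a.tail ++ [c])))
          = GspecP s (i :: rest) := by
        funext a
        rw [Gspec_cons]
        simp [Bool.and_assoc]
      rw [hfun]

-- getD after a keyed-insert loop (value a function of the key)
lemma getD_foldl_insert_fun (l : List (List Char)) (f : List Char → Bool)
    (d : PySem.Dict (List Char) Bool) (w : List Char) :
    (l.foldl (fun d w => d.insert w (f w)) d).getD w false
      = if w ∈ l then f w else d.getD w false := by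
  induction l generalizing d with
  | nil => simp
  | cons x t ih =>
    by_cases hw : w ∈ t
    · simp [List.foldl_cons, ih, hw]
    · by_cases hx : w = x
      · subst hx
        rw [List.foldl_cons, ih]
        simp [hw, PySem.Dict.getD_insert_self]
      · simp [List.foldl_cons, ih, hw, hx, PySem.Dict.getD_insert]

lemma getD_foldl_insert_const (l : List (List Char))
    (d : PySem.Dict (List Char) Bool) (w : List Char) :
    (l.foldl (fun d w => d.insert w true) d).getD w false
      = if w ∈ l then true else d.getD w false := by
  simpa using getD_foldl_insert_fun l (fun _ => true) d w

lemma compsB_snoc (pat : List Char) (ch : Char) :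
    compsB (pat ++ [ch]) = (compsB pat).flatMap fun p => (optsB ch).map fun c => p ++ [c] := by
  simp [compsB, List.foldl_append]

-- membership in compsB is pointwise membership in optsB
lemma mem_compsB_iff (pat w : List Char) :
    w ∈ compsB pat ↔ List.Forall₂ (fun c ch => c ∈ optsB ch) w pat := by
  induction pat using List.reverseRecOn generalizing w with
  | nil => simp [compsB, List.forall₂_nil_right_iff]
  | append_singleton pat ch ih =>
    rw [compsB_snoc, List.mem_flatMap]
    constructor
    · rintro ⟨p, hp, hw⟩
      rw [List.mem_map] at hw
      obtain ⟨c, hc, rfl⟩ := hw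
      exact List.rel_append (ih p |>.mp hp) (List.Forall₂.cons hc List.Forall₂.nil)
    · intro h
      have h1 := List.forall₂_take_append _ _ _ h
      have h2 := List.forall₂_drop_append _ _ _ h
      generalize hdrop : w.drop pat.length = r at h2
      cases h2 with
      | cons hc htl =>
        rename_i a l'
        cases htl
        refine ⟨w.take pat.length, (ih _).mpr h1, ?_⟩
        rw [List.mem_map]
        refine ⟨a, hc, ?_⟩
        conv_rhs => rw [← List.take_append_drop pat.length w]
        rw [hdrop]

lemma mem_compsB_step {pat w : List Char} {c ch : Char}
    (hw : w ∈ compsB pat) (hc : c ∈ optsB ch) (hpat : pat ≠ []) :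
    w.tail ++ [c] ∈ compsB (pat.tail ++ [ch]) := by
  rw [mem_compsB_iff] at hw ⊢
  cases hw with
  | nil => exact absurd rfl hpat
  | cons h htl => exact List.rel_append htl (List.Forall₂.cons hc List.Forall₂.nil)

lemma slice_five (s : List Char) (j : Nat) (h5 : 5 ≤ j) :
    PySem.List.slice s (some ((j : Int) - 5)) (some (j : Int)) = (s.drop (j - 5)).take 5 := by
  have e1 : (j : Int) - 5 = (((j - 5 : Nat)) : Int) := by omega
  rw [e1, PySem.List.slice_natCast]
  congr 1
  omega

lemma slice_five_ne_nil (s : List Char) (j : Nat) (h5 : 5 ≤ j) (hj : j ≤ s.length) :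
    PySem.List.slice s (some ((j : Int) - 5)) (some (j : Int)) ≠ [] := by
  rw [slice_five s j h5, ← List.length_pos_iff]
  simp only [List.length_take, List.length_drop]
  omega

lemma take4_snoc (l : List Char) (h : 4 < l.length) : l.take 4 ++ [l[4]] = l.take 5 := by
  conv_rhs => rw [show (5 : Nat) = 4 + 1 from by norm_num, List.take_succ]
  rw [List.getElem?_eq_getElem h]
  rfl

lemma slice_tail_snoc (s : List Char) (j : Nat) (h5 : 5 ≤ j) (hj : j < s.length) :
    (PySem.List.slice s (some ((j : Int) - 5)) (some (j : Int))).tail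
        ++ [PySem.List.pyGetD s ((j : Int)) ' ']
      = PySem.List.slice s (some (((j + 1 : Nat) : Int) - 5)) (some ((j + 1 : Nat) : Int)) := by
  rw [slice_five s j h5, slice_five s (j + 1) (by omega), pyGetD_nat s j hj]
  rw [← List.drop_one, List.drop_take, List.drop_drop]
  norm_num
  have hlen4 : 4 < (List.drop (j - 5 + 1) s).length := by
    simp only [List.length_drop]
    omega
  have e4 : (List.drop (j - 5 + 1) s)[4]'hlen4 = s[j] := by
    rw [List.getElem_drop]
    congr 1
    omega
  rw [← e4, show j + 1 - 5 = j - 5 + 1 from by omega]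
  exact take4_snoc _ hlen4

-- A's first phase builds exactly B's completions of S[:5]
lemma phase1_eq (s : List Char) (k : Nat) (hk : k ≤ s.length) :
    (PySem.List.pyRange 0 ((k : Nat) : Int) 1).foldl (fun cur i =>
        cur.foldl (fun nxt cand =>
          (tailA s i).foldl (fun nxt t => nxt ++ [cand ++ [t]]) nxt) []) [([] : List Char)]
      = compsB (s.take k) := by
  induction k with
  | zero =>
    rw [show ((0 : Nat) : Int) = 0 from rfl, PySem.List.pyRange_one_eq_nil (le_refl 0)]
    simp [compsB]
  | succ k ih =>
    have hk' : k ≤ s.length := by omega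
    have hcast : ((k + 1 : Nat) : Int) = ((k : Nat) : Int) + 1 := by push_cast; ring
    rw [hcast, PySem.List.pyRange_one_succ_right (by omega), List.foldl_append, ih hk',
      List.foldl_cons, List.foldl_nil]
    rw [List.take_succ, List.getElem?_eq_getElem (show k < s.length by omega)]
    show _ = compsB (s.take k ++ [s[k]])
    rw [compsB_snoc]
    simp only [PySem.List.foldl_append_singleton_eq_map, PySem.List.foldl_append_eq_flatMap,
      List.nil_append]
    rw [tailA_eq_optsB, pyGetD_nat s k (by omega)]
    rfl

-- B's backward fold computes GspecP on every window of the current pattern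
lemma B_inv (s : List Char) (M : Nat) (hlen : M ≤ s.length) :
    ∀ (n j : Nat), 5 ≤ j → j + n = M →
    ∀ w ∈ compsB (PySem.List.slice s (some (((j : Nat) : Int) - 5)) (some ((j : Nat) : Int))),
      ((PySem.List.pyRange ((j : Nat) : Int) ((M : Nat) : Int) 1).foldr (fun i nxt =>
          (compsB (PySem.List.slice s (some (i - 5)) (some i))).foldl (fun cur w =>
            cur.insert w ((optsB (PySem.List.pyGetD s i ' ')).any fun c =>
              !palB (w ++ [c]) && !palB (PySem.List.slice w (some 1) none ++ [c]) &&
              nxt.getD (PySem.List.slice w (some 1) none ++ [c]) false)) PySem.Dict.empty)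
        ((compsB (PySem.List.slice s (some (((M : Nat) : Int) - 5)) (some ((M : Nat) : Int)))).foldl
          (fun d w => d.insert w true) PySem.Dict.empty)).getD w false
      = GspecP s (PySem.List.pyRange ((j : Nat) : Int) ((M : Nat) : Int) 1) w := by
  intro n
  induction n with
  | zero =>
    intro j h5 hjM w hw
    have hjM' : j = M := by omega
    subst hjM'
    rw [PySem.List.pyRange_one_eq_nil (le_refl _)]
    rw [List.foldr_nil, getD_foldl_insert_const, if_pos hw, Gspec_nil]
  | succ n ih =>
    intro j h5 hjM w hw
    have hlt : ((j : Nat) : Int) < ((M : Nat) : Int) := by omega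
    have hc1 : ((j : Nat) : Int) + 1 = (((j + 1 : Nat)) : Int) := by omega
    rw [PySem.List.pyRange_one_cons hlt, hc1, List.foldr_cons, getD_foldl_insert_fun, if_pos hw,
      Gspec_cons, tailA_eq_optsB]
    apply PySem.List.any_congr_mem
    intro c hcmem
    have hkey :
        ((PySem.List.pyRange (((j + 1 : Nat)) : Int) ((M : Nat) : Int) 1).foldr (fun i nxt =>
          (compsB (PySem.List.slice s (some (i - 5)) (some i))).foldl (fun cur w =>
            cur.insert w ((optsB (PySem.List.pyGetD s i ' ')).any fun c =>
              !palB (w ++ [c]) && !palB (PySem.List.slice w (some 1) none ++ [c]) &&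
              nxt.getD (PySem.List.slice w (some 1) none ++ [c]) false)) PySem.Dict.empty)
        ((compsB (PySem.List.slice s (some (((M : Nat) : Int) - 5)) (some ((M : Nat) : Int)))).foldl
          (fun d w => d.insert w true) PySem.Dict.empty)).getD
            (PySem.List.slice w (some 1) none ++ [c]) false
        = GspecP s (PySem.List.pyRange (((j + 1 : Nat)) : Int) ((M : Nat) : Int) 1)
            (PySem.List.slice w (some 1) none ++ [c]) := by
      rw [PySem.List.slice_from_one]
      apply ih (j + 1) (by omega) (by omega)
      have hmem := mem_compsB_step hw hcmem (slice_five_ne_nil s j h5 (by omega))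
      rw [slice_tail_snoc s j h5 (by omega)] at hmem
      exact hmem
    rw [hkey]
    rw [PySem.List.slice_from_one]

lemma phase1_eq5 (s : List Char) (h : 5 ≤ s.length) :
    (PySem.List.pyRange 0 5 1).foldl (fun cur i =>
        cur.foldl (fun nxt cand =>
          (tailA s i).foldl (fun nxt t => nxt ++ [cand ++ [t]]) nxt) []) [([] : List Char)]
      = compsB (s.take 5) := by
  have h0 := phase1_eq s 5 h
  have e : ((5 : Nat) : Int) = (5 : Int) := by norm_num
  rw [e] at h0
  exact h0

lemma decide_loopA (s : List Char) (P : List Int) (cur : List (List Char)) :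
    decide (0 < (loopA s P cur).length) = cur.any (GspecP s P) := by
  by_cases hany : cur.any (GspecP s P) = true
  · have hne := (loopA_any s P cur).mpr hany
    rw [hany]
    simpa [List.length_pos_iff] using hne
  · have hnil : loopA s P cur = [] := by
      by_contra hne
      exact hany ((loopA_any s P cur).mp hne)
    rw [hnil]
    simp only [List.length_nil, lt_self_iff_false, decide_false]
    exact (Bool.eq_false_iff.mpr hany).symm

-- ===== VERDICT (by name: the statement is the Claim_ definition above) =====
theorem solve_spec : Claim_equal_solve := by
  unfold Claim_equal_solve
  intro N S hdom hpre
  unfold Spec_solve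
  by_cases h5 : N < 5
  · simp only [solve, solve_alt, if_pos h5]
  · have hlen : N ≤ (S.toList.length : Int) := by
      rcases hpre with h | h
      · exact absurd h h5
      · exact h
    obtain ⟨M, rfl⟩ : ∃ M : Nat, N = ((M : Nat) : Int) := ⟨N.toNat, by omega⟩
    have hM5 : 5 ≤ M := by omega
    have hMlen : M ≤ S.toList.length := by exact_mod_cast hlen
    have hMlen5 : 5 ≤ S.toList.length := by omega
    simp only [solve, solve_alt, if_neg h5]
    rw [phase1_eq5 S.toList hMlen5, decide_loopA, List.any_filter]
    have hsl5 : PySem.List.slice S.toList none (some 5) = S.toList.take 5 := by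
      rw [PySem.List.slice_to (xs := S.toList) (b := 5) (by norm_num)]
      rfl
    rw [hsl5]
    rw [PySem.List.pyRange_neg_one_eq_reverse,
      show (4 : Int) + 1 = 5 from by norm_num,
      show ((M : Nat) : Int) - 1 + 1 = ((M : Nat) : Int) from by ring,
      List.foldl_reverse]
    apply PySem.List.any_congr_mem
    intro w hw
    rw [palA_eq_palB]
    have hwmem : w ∈ compsB (PySem.List.slice S.toList
        (some (((5 : Nat) : Int) - 5)) (some ((5 : Nat) : Int))) := by
      rw [slice_five S.toList 5 (le_refl _)]
      simpa using hw
    have hkey := B_inv S.toList M hMlen (M - 5) 5 (le_refl 5) (by omega) w hwmem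
    push_cast at hkey
    rw [hkey]
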